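-- pv_equiv track=rewrite | github.com/picasso653/codesignal_-codes | Interview Prep/mix_by_3.py | reversed_triple_chars
-- ===== SOURCE A (Python) =====
-- def reversed_triple_chars(s: str) -> str:
--     res = ''
--     n = len(s)
--     k = 0
--     for i in range(2, n - (n % 3), 3):
--         res += s[k:i+1][::-1]
--         k = i + 1
--     res += s[k:]
--     return res
-- ===== SOURCE B (Python) =====
-- def reversed_triple_chars(s: str) -> str:
--     t = len(s) - len(s) % 3
--     return ''.join(s[i + 2 - 2 * (i % 3)] for i in range(t)) + s[t:]
-- ===== Notes on version B (the rewrite author's own statement) =====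
-- stated objective: alternative
-- what changed: Replaces A's slice-reverse-and-concatenate loop with running offset k by a single closed-form per-character gather: output[i] = s[i + 2 - 2*(i % 3)] for i below the last full triple, plus the untouched tail.
import Mathlib
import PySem

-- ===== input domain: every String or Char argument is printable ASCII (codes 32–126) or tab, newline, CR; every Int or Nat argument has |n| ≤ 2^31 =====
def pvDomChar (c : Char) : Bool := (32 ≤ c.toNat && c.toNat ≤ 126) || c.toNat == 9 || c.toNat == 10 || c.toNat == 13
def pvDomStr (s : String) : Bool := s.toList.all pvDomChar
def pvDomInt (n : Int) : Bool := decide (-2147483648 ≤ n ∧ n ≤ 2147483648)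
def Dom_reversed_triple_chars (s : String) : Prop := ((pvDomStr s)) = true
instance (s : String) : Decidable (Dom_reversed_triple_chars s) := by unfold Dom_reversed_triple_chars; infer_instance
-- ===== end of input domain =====

-- B replaces A's slice-reverse-and-concatenate loop by a closed-form per-character
-- index map (output[i] = s[i + 2 - 2*(i % 3)] inside full triples): objective 'alternative'.

-- ===== PORT A =====
-- Literal port of A: foldl over range(2, n - n%3, 3) carrying the state (res, k);
-- s[k:i+1][::-1] is the slice followed by reversal (PySem.List.slice?_none_none_neg_one:
-- [::-1] is List.reverse); string concatenation is carried as a List Char.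
def reversed_triple_chars (s : String) : String :=
  let n : Int := PySem.Str.len s
  let st : List Char × Int :=
    (PySem.List.pyRange 2 (n - PySem.Int.mod n 3) 3).foldl
      (fun st i =>
        (st.1 ++ (PySem.List.slice s.toList (some st.2) (some (i + 1))).reverse, i + 1))
      ([], 0)
  String.ofList (st.1 ++ PySem.List.slice s.toList (some st.2) none)

-- ===== PORT B =====
-- Literal port of B: t = len(s) - len(s) % 3; join of the generator
-- (s[i + 2 - 2*(i % 3)] for i in range(t)) followed by the tail s[t:].
-- The index i + 2 - 2*(i % 3) is always in range for i < t, so the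
-- pyGetD default ' ' is never used (Python would raise only out of range).
def reversed_triple_chars_alt (s : String) : String :=
  let t : Int := PySem.Str.len s - PySem.Int.mod (PySem.Str.len s) 3
  String.ofList
    (((PySem.List.pyRange 0 t 1).map
        (fun i => PySem.List.pyGetD s.toList (i + 2 - 2 * PySem.Int.mod i 3) ' '))
      ++ PySem.List.slice s.toList (some t) none)

-- ===== PRECONDITION & SPEC =====
def Spec_reversed_triple_chars (s : String) (out : String) : Prop := out = reversed_triple_chars_alt s
instance (s : String) (out : String) : Decidable (Spec_reversed_triple_chars s out) := by unfold Spec_reversed_triple_chars; infer_instance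

-- ===== CLAIM (what is proved, stated in full; the proofs are below) =====
def Claim_equal_reversed_triple_chars : Prop := ∀ (s : String), Dom_reversed_triple_chars s → Spec_reversed_triple_chars s (reversed_triple_chars s)

-- ===== LEMMAS AND PROOFS =====

-- the per-character gather B performs, on the Nat/list level
def pvGather (l : List Char) (t : Nat) : List Char :=
  (List.range t).map (fun k => l.getD (k + 2 - 2 * (k % 3)) ' ')

lemma pvMod3 (n : Nat) : PySem.Int.mod (n : Int) 3 = ((n % 3 : Nat) : Int) := by
  unfold PySem.Int.mod
  rw [Int.fmod_eq_emod]
  rw [if_pos (Or.inl (by norm_num))]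
  omega

-- a full 3-chunk, as B's gather sees it
lemma pvGather_step (l : List Char) (m : Nat) :
    pvGather l (3 * (m + 1)) =
      pvGather l (3 * m) ++ [l.getD (3 * m + 2) ' ', l.getD (3 * m + 1) ' ', l.getD (3 * m) ' '] := by
  unfold pvGather
  have h3 : 3 * (m + 1) = (3 * m + 1) + 1 + 1 := by omega
  rw [h3, List.range_succ, List.range_succ, List.range_succ]
  simp [List.map_append]

-- the slice A reverses, as three explicit characters
lemma pvSlice_three (j : Nat) (l : List Char) (h : j + 3 ≤ l.length) :
    (l.drop j).take 3 = [l.getD j ' ', l.getD (j + 1) ' ', l.getD (j + 2) ' '] := by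
  induction j generalizing l with
  | zero =>
    match l, h with
    | a :: b :: c :: r, _ => simp [List.getD]
  | succ j ih =>
    match l, h with
    | x :: l', h =>
      have := ih l' (by simpa using h)
      simpa [List.getD_cons_succ] using this

-- invariant of A's loop: after m iterations the state is (gather of the first 3m chars, 3m)
lemma pvLoop_invariant (l : List Char) (m : Nat) (hm : 3 * m ≤ l.length) :
    ((List.range m).map (fun (k : Nat) => (2 : Int) + 3 * (k : Int))).foldl
      (fun (st : List Char × Int) i =>
        (st.1 ++ (PySem.List.slice l (some st.2) (some (i + 1))).reverse, i + 1))
      ([], 0)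
    = (pvGather l (3 * m), ((3 * m : Nat) : Int)) := by
  induction m with
  | zero => simp [pvGather]
  | succ m ih =>
    rw [List.range_succ, List.map_append, List.foldl_append, ih (by omega)]
    simp only [List.map_cons, List.map_nil, List.foldl_cons, List.foldl_nil]
    have hidx : (2 : Int) + 3 * (m : Int) + 1 = ((3 * m + 3 : Nat) : Int) := by push_cast; ring
    rw [hidx, PySem.List.slice_natCast]
    have h3 : 3 * m + 3 - 3 * m = 3 := by omega
    rw [h3, pvSlice_three (3 * m) l (by omega), pvGather_step l m]
    simp [Nat.mul_succ]

lemma pvRange23_eq (b : Int) (m : Nat) (hb : b = ((3 * m : Nat) : Int)) :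
    PySem.List.pyRange 2 b 3 = (List.range m).map (fun (k : Nat) => (2 : Int) + 3 * (k : Int)) := by
  rw [PySem.List.pyRange_of_pos 2 b (by norm_num)]
  have hc : (if 2 < b then ((b - 2 + 3 - 1) / 3).toNat else 0) = m := by
    subst hb
    by_cases h2 : (2 : Int) < ((3 * m : Nat) : Int)
    · rw [if_pos h2]
      push_cast at h2 ⊢
      omega
    · rw [if_neg h2]
      push_cast at h2
      omega
  rw [hc]

-- ===== VERDICT (by name: the statement is the Claim_ definition above) =====
theorem reversed_triple_chars_spec : Claim_equal_reversed_triple_chars := by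
  intro s _
  unfold Spec_reversed_triple_chars reversed_triple_chars reversed_triple_chars_alt
  set l := s.toList with hl
  have hlen : PySem.Str.len s = (l.length : Int) := by simp [PySem.Str.len_eq, hl]
  set m : Nat := l.length / 3 with hm
  have hb : PySem.Str.len s - PySem.Int.mod (PySem.Str.len s) 3 = ((3 * m : Nat) : Int) := by
    rw [hlen, pvMod3 l.length]
    push_cast
    omega
  simp only [hb]
  rw [pvRange23_eq _ m rfl, pvLoop_invariant l m (by omega)]
  -- both sides are gather ++ tail; rewrite B's map into pvGather
  have hB : (PySem.List.pyRange 0 ((3 * m : Nat) : Int) 1).map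
      (fun i => PySem.List.pyGetD l (i + 2 - 2 * PySem.Int.mod i 3) ' ') = pvGather l (3 * m) := by
    rw [PySem.List.pyRange_one]
    rw [List.map_map]
    have : ((3 * m : Nat) : Int) - 0 = ((3 * m : Nat) : Int) := by ring
    rw [this, Int.toNat_natCast]
    unfold pvGather
    apply List.map_congr_left
    intro k _
    simp only [Function.comp]
    have hmod : PySem.Int.mod ((0 : Int) + (k : Int)) 3 = ((k % 3 : Nat) : Int) := by
      rw [show ((0 : Int) + (k : Int)) = ((k : Nat) : Int) by ring]
      exact pvMod3 k
    rw [hmod]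
    have hidx : (0 : Int) + (k : Int) + 2 - 2 * ((k % 3 : Nat) : Int)
        = ((k + 2 - 2 * (k % 3) : Nat) : Int) := by
      have : k % 3 ≤ 2 := by omega
      push_cast
      omega
    rw [hidx, PySem.List.pyGetD_natCast]
  rw [hB]
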